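-- pv_equiv track=rewrite | github.com/chanikyu/xfeed | scripts/profiles.py | build_species_capabilities
-- ===== SOURCE A (Python) =====
-- def build_species_capabilities(
--     species_kos: dict[str, set[str]],
--     ko_to_reaction: dict[str, list[str]],
--     reaction_equations: dict[str, dict[str, list[str]]],
-- ) -> dict[str, dict[str, set[str]]]:
--     """Derive per-species produces/consumes compound sets from KEGG reactions."""
--     caps: dict[str, dict[str, set[str]]] = {}
--     for sp, kos in species_kos.items():
--         produces: set[str] = set()
--         consumes: set[str] = set()
--         for ko in kos:
--             for rn in ko_to_reaction.get(ko, []):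
--                 eq = reaction_equations.get(rn)
--                 if not eq:
--                     continue
--                 produces.update(eq["products"])
--                 consumes.update(eq["substrates"])
--         caps[sp] = {"produces": produces, "consumes": consumes}
--     return caps
-- ===== SOURCE B (Python) =====
-- def build_species_capabilities(
--     species_kos: dict[str, set[str]],
--     ko_to_reaction: dict[str, list[str]],
--     reaction_equations: dict[str, dict[str, list[str]]],
-- ) -> dict[str, dict[str, set[str]]]:
--     """Derive per-species produces/consumes compound sets from KEGG reactions,
--     via a lazily built (memoized) per-KO index: each KO's (produces, consumes)
--     sets are computed once on first use and cached, then species are formed by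
--     unioning their KOs' cached sets (index-then-combine instead of a fully
--     nested per-species reaction scan)."""
--
--     ko_caps: dict[str, tuple[set[str], set[str]]] = {}
--
--     def ko_sets(ko: str) -> tuple[set[str], set[str]]:
--         if ko not in ko_caps:
--             eqs = [eq for rn in ko_to_reaction.get(ko, ())
--                    if (eq := reaction_equations.get(rn))]
--             ko_caps[ko] = (
--                 set().union(*(eq["products"] for eq in eqs)),
--                 set().union(*(eq["substrates"] for eq in eqs)),
--             )
--         return ko_caps[ko]
--
--     caps: dict[str, dict[str, set[str]]] = {}
--     for sp, kos in species_kos.items():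
--         pairs = [ko_sets(ko) for ko in kos]
--         caps[sp] = {
--             "produces": set().union(*(p for p, _ in pairs)),
--             "consumes": set().union(*(c for _, c in pairs)),
--         }
--     return caps
-- ===== Notes on version B (the rewrite author's own statement) =====
-- stated objective: alternative
-- what changed: Replaces A's fully nested per-species scan over KOs and reactions by a memoized per-KO index: each KO's (produces, consumes) sets are computed once on first use (filter the KO's equations, then one union per set) and cached, and each species is formed by unioning its KOs' cached sets.
import Mathlib
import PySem

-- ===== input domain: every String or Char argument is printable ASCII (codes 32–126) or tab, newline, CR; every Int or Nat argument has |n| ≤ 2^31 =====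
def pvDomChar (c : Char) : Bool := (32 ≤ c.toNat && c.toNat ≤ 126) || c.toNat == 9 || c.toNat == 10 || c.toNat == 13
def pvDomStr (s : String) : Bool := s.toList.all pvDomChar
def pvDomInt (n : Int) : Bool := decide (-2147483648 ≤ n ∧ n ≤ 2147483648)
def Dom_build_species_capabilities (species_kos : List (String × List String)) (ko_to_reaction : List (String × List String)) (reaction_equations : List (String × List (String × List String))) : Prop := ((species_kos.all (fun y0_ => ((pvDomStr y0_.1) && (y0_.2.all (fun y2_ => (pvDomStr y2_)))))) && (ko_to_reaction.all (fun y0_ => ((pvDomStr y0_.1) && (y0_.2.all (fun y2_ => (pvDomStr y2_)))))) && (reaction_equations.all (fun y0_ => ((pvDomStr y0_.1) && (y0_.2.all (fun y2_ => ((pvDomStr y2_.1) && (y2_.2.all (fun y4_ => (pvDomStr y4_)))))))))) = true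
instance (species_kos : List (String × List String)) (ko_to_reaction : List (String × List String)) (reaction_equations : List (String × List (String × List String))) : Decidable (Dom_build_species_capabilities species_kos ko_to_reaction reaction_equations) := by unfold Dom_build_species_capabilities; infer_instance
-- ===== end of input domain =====

-- B replaces A's fully nested per-species reaction scan by a lazily built (memoized) per-KO
-- index combined per species (objective: alternative decomposition; equivalence is about the
-- RETURN value — neither program mutates its arguments).

-- ===== PORT A =====
-- A's inner-loop body 'eq = reaction_equations.get(rn); if not eq: continue;
-- produces.update(eq["products"]); consumes.update(eq["substrates"])'.
-- eq["products"] / eq["substrates"] would raise KeyError on a non-empty eq missing the key;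
-- Pre_ excludes those inputs, so the getD totalisation is exact on the admitted domain.
def pvRnStep (reaction_equations : List (String × List (String × List String)))
    (pc : PySem.Set String × PySem.Set String) (rn : String) :
    PySem.Set String × PySem.Set String :=
  match (PySem.Dict.mk reaction_equations).get? rn with
  | none => pc
  | some eq =>
    if eq = [] then pc
    else (PySem.Set.update pc.1 ((PySem.Dict.mk eq).getD "products" []),
          PySem.Set.update pc.2 ((PySem.Dict.mk eq).getD "substrates" []))

def build_species_capabilities (species_kos : List (String × List String)) (ko_to_reaction : List (String × List String)) (reaction_equations : List (String × List (String × List String))) : List (String × List (String × List String)) :=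
  (species_kos.foldl
    (fun (caps : PySem.Dict String (List (String × List String))) p =>
      let pc := p.2.foldl
        (fun pc ko => ((PySem.Dict.mk ko_to_reaction).getD ko []).foldl (pvRnStep reaction_equations) pc)
        ((PySem.Set.empty : PySem.Set String), (PySem.Set.empty : PySem.Set String))
      caps.insert p.1 [("produces", pc.1), ("consumes", pc.2)])
    PySem.Dict.empty).items

-- ===== PORT B =====
-- Source B's helper ko_sets(ko): on a cache miss it filters the KO's registered equations once
-- and builds each set as one union over them (eq["products"] / eq["substrates"] raise
-- KeyError on a non-empty eq missing the key — those inputs are excluded by Pre_, so the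
-- getD totalisation is exact), then stores the result.
def pvKoSets (ko_to_reaction : List (String × List String)) (reaction_equations : List (String × List (String × List String)))
    (cache : PySem.Dict String (PySem.Set String × PySem.Set String)) (ko : String) :
    PySem.Dict String (PySem.Set String × PySem.Set String) × (PySem.Set String × PySem.Set String) :=
  match cache.get? ko with
  | some v => (cache, v)
  | none =>
    let eqs := ((PySem.Dict.mk ko_to_reaction).getD ko []).filterMap
      (fun rn =>
        match (PySem.Dict.mk reaction_equations).get? rn with
        | none => none
        | some eq => if eq = [] then none else some eq)
    let v := (eqs.foldl (fun s eq => PySem.Set.update s ((PySem.Dict.mk eq).getD "products" []))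
                (PySem.Set.empty : PySem.Set String),
              eqs.foldl (fun s eq => PySem.Set.update s ((PySem.Dict.mk eq).getD "substrates" []))
                (PySem.Set.empty : PySem.Set String))
    (cache.insert ko v, v)

-- the list comprehension 'pairs = [ko_sets(ko) for ko in kos]', threading the cache
def pvPairStep (ko_to_reaction : List (String × List String)) (reaction_equations : List (String × List (String × List String)))
    (cp : PySem.Dict String (PySem.Set String × PySem.Set String) × List (PySem.Set String × PySem.Set String)) (ko : String) :
    PySem.Dict String (PySem.Set String × PySem.Set String) × List (PySem.Set String × PySem.Set String) :=
  ((pvKoSets ko_to_reaction reaction_equations cp.1 ko).1,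
   cp.2 ++ [(pvKoSets ko_to_reaction reaction_equations cp.1 ko).2])

def build_species_capabilities_alt (species_kos : List (String × List String)) (ko_to_reaction : List (String × List String)) (reaction_equations : List (String × List (String × List String))) : List (String × List (String × List String)) :=
  ((species_kos.foldl
    (fun (st : PySem.Dict String (PySem.Set String × PySem.Set String) × PySem.Dict String (List (String × List String))) p =>
      ((p.2.foldl (pvPairStep ko_to_reaction reaction_equations) (st.1, [])).1,
       st.2.insert p.1
         [("produces", (p.2.foldl (pvPairStep ko_to_reaction reaction_equations) (st.1, [])).2.foldl
             (fun s q => PySem.Set.union s q.1) (PySem.Set.empty : PySem.Set String)),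
          ("consumes", (p.2.foldl (pvPairStep ko_to_reaction reaction_equations) (st.1, [])).2.foldl
             (fun s q => PySem.Set.union s q.2) (PySem.Set.empty : PySem.Set String))]))
    (PySem.Dict.empty, PySem.Dict.empty)).2).items

-- ===== PRECONDITION & SPEC =====
-- true iff the equation registered for rn (if any) is empty or carries both compound keys
def pvEqOk (reaction_equations : List (String × List (String × List String))) (rn : String) : Bool :=
  match (PySem.Dict.mk reaction_equations).get? rn with
  | none => true
  | some eq => eq.isEmpty ||
      ((PySem.Dict.mk eq).contains "products" && (PySem.Dict.mk eq).contains "substrates")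

-- Pre_ excludes exactly the inputs on which A (and B) raises KeyError: some species reaches,
-- through one of its KOs, a non-empty reaction equation lacking a "products" or "substrates"
-- key.
def Pre_build_species_capabilities (species_kos : List (String × List String)) (ko_to_reaction : List (String × List String)) (reaction_equations : List (String × List (String × List String))) : Prop :=
  (species_kos.all (fun p => p.2.all (fun ko =>
    ((PySem.Dict.mk ko_to_reaction).getD ko []).all (pvEqOk reaction_equations)))) = true
instance (species_kos : List (String × List String)) (ko_to_reaction : List (String × List String)) (reaction_equations : List (String × List (String × List String))) : Decidable (Pre_build_species_capabilities species_kos ko_to_reaction reaction_equations) := by unfold Pre_build_species_capabilities; infer_instance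

def pvWitness_build_species_capabilities : (List (String × List String)) × (List (String × List String)) × (List (String × List (String × List String))) :=
  ([("sp1", ["k1", "k2"])], [("k1", ["r1"])], [("r1", [("products", ["c1"]), ("substrates", ["c2"])])])

def Spec_build_species_capabilities (species_kos : List (String × List String)) (ko_to_reaction : List (String × List String)) (reaction_equations : List (String × List (String × List String))) (out : List (String × List (String × List String))) : Prop := out = build_species_capabilities_alt species_kos ko_to_reaction reaction_equations
instance (species_kos : List (String × List String)) (ko_to_reaction : List (String × List String)) (reaction_equations : List (String × List (String × List String))) (out : List (String × List (String × List String))) : Decidable (Spec_build_species_capabilities species_kos ko_to_reaction reaction_equations out) := by unfold Spec_build_species_capabilities; infer_instance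

-- ===== CLAIM (what is proved, stated in full; the proofs are below) =====
def Claim_equal_build_species_capabilities : Prop := ∀ (species_kos : List (String × List String)) (ko_to_reaction : List (String × List String)) (reaction_equations : List (String × List (String × List String))), Dom_build_species_capabilities species_kos ko_to_reaction reaction_equations → Pre_build_species_capabilities species_kos ko_to_reaction reaction_equations → Spec_build_species_capabilities species_kos ko_to_reaction reaction_equations (build_species_capabilities species_kos ko_to_reaction reaction_equations)

-- ===== LEMMAS AND PROOFS =====

-- update s (add t x) = add (update s t) x
theorem pv_update_add {α : Type} [BEq α] [LawfulBEq α] (s t : PySem.Set α) (x : α) :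
    PySem.Set.update s (PySem.Set.add t x) = PySem.Set.add (PySem.Set.update s t) x := by
  by_cases hx : x ∈ t
  · have h1 : PySem.Set.add t x = t := by
      simp [PySem.Set.add, hx]
    have hmem : x ∈ PySem.Set.update s t := (PySem.Set.mem_update s t x).mpr (Or.inr hx)
    have h2 : PySem.Set.add (PySem.Set.update s t) x = PySem.Set.update s t := by
      simp [PySem.Set.add, hmem]
    rw [h1, h2]
  · have h1 : PySem.Set.add t x = t ++ [x] := by
      simp [PySem.Set.add, hx]
    rw [h1]
    simp [PySem.Set.update, List.foldl_append]

-- update s (update t l) = update (update s t) l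
theorem pv_update_update {α : Type} [BEq α] [LawfulBEq α] (l : List α) (s t : PySem.Set α) :
    PySem.Set.update s (PySem.Set.update t l) = PySem.Set.update (PySem.Set.update s t) l := by
  induction l generalizing t with
  | nil => simp [PySem.Set.update_nil]
  | cons x l ih =>
    rw [PySem.Set.update_cons t x l, ih (PySem.Set.add t x), pv_update_add,
      ← PySem.Set.update_cons]

-- proof-side decomposition of pvRnStep into componentwise updates
def pvPL (reaction_equations : List (String × List (String × List String))) (rn : String) : List String :=
  match (PySem.Dict.mk reaction_equations).get? rn with
  | none => []
  | some eq => if eq = [] then [] else (PySem.Dict.mk eq).getD "products" []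

def pvSL (reaction_equations : List (String × List (String × List String))) (rn : String) : List String :=
  match (PySem.Dict.mk reaction_equations).get? rn with
  | none => []
  | some eq => if eq = [] then [] else (PySem.Dict.mk eq).getD "substrates" []

theorem pvRnStep_eq (re : List (String × List (String × List String)))
    (pc : PySem.Set String × PySem.Set String) (rn : String) :
    pvRnStep re pc rn = (PySem.Set.update pc.1 (pvPL re rn), PySem.Set.update pc.2 (pvSL re rn)) := by
  unfold pvRnStep pvPL pvSL
  cases (PySem.Dict.mk re).get? rn with
  | none => simp [PySem.Set.update_nil]
  | some eq =>
    by_cases h : eq = [] <;> simp [h, PySem.Set.update_nil]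

-- the inner fold starting from pc is the inner fold from (∅, ∅), unioned into pc
theorem pv_foldl_rnStep (re : List (String × List (String × List String)))
    (rns : List String) (pc : PySem.Set String × PySem.Set String) :
    rns.foldl (pvRnStep re) pc =
      (PySem.Set.update pc.1 (rns.foldl (pvRnStep re) (PySem.Set.empty, PySem.Set.empty)).1,
       PySem.Set.update pc.2 (rns.foldl (pvRnStep re) (PySem.Set.empty, PySem.Set.empty)).2) := by
  induction rns generalizing pc with
  | nil =>
    simp [PySem.Set.update_nil]
  | cons rn rns ih =>
    simp only [List.foldl_cons]
    rw [ih (pvRnStep re pc rn), ih (pvRnStep re (PySem.Set.empty, PySem.Set.empty) rn)]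
    have h1 : ∀ (a : PySem.Set String) (l m : List String),
        PySem.Set.update a (PySem.Set.update (PySem.Set.update PySem.Set.empty l) m)
          = PySem.Set.update (PySem.Set.update a l) m := by
      intro a l m
      rw [pv_update_update, pv_update_update]
      rfl
    simp only [pvRnStep_eq]
    simp only [h1]

-- the value Source B's ko_sets computes (and caches) for a KO
def pvF (kr : List (String × List String)) (re : List (String × List (String × List String)))
    (ko : String) : PySem.Set String × PySem.Set String :=
  ((PySem.Dict.mk kr).getD ko []).foldl (pvRnStep re) (PySem.Set.empty, PySem.Set.empty)

-- cache invariant: every cached entry is the value ko_sets would compute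
def pvInv (kr : List (String × List String)) (re : List (String × List (String × List String)))
    (cache : PySem.Dict String (PySem.Set String × PySem.Set String)) : Prop :=
  ∀ ko v, cache.get? ko = some v → v = pvF kr re ko

-- the filter used by Source B's ko_sets
def pvEqs (kr : List (String × List String)) (re : List (String × List (String × List String)))
    (ko : String) : List (List (String × List String)) :=
  ((PySem.Dict.mk kr).getD ko []).filterMap
    (fun rn =>
      match (PySem.Dict.mk re).get? rn with
      | none => none
      | some eq => if eq = [] then none else some eq)

-- A's interleaved reaction fold equals B's filter-then-two-component-folds shape
theorem pv_rns_split (re : List (String × List (String × List String)))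
    (rns : List String) (a b : PySem.Set String) :
    rns.foldl (pvRnStep re) (a, b) =
      ((rns.filterMap (fun rn =>
          match (PySem.Dict.mk re).get? rn with
          | none => none
          | some eq => if eq = [] then none else some eq)).foldl
            (fun s eq => PySem.Set.update s ((PySem.Dict.mk eq).getD "products" [])) a,
       (rns.filterMap (fun rn =>
          match (PySem.Dict.mk re).get? rn with
          | none => none
          | some eq => if eq = [] then none else some eq)).foldl
            (fun s eq => PySem.Set.update s ((PySem.Dict.mk eq).getD "substrates" [])) b) := by
  induction rns generalizing a b with
  | nil => simp
  | cons rn rns ih =>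
    simp only [List.foldl_cons, List.filterMap_cons]
    unfold pvRnStep
    cases (PySem.Dict.mk re).get? rn with
    | none => exact ih a b
    | some eq =>
      by_cases h : eq = []
      · simp only [h, if_true]
        exact ih a b
      · simp only [if_neg h]
        simp only [List.foldl_cons]
        exact ih _ _

theorem pvKoSets_snd (kr : List (String × List String)) (re : List (String × List (String × List String)))
    (cache : PySem.Dict String (PySem.Set String × PySem.Set String)) (ko : String)
    (h : pvInv kr re cache) :
    (pvKoSets kr re cache ko).2 = pvF kr re ko := by
  unfold pvKoSets
  cases hc : cache.get? ko with
  | some v => exact h ko v hc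
  | none =>
    dsimp only
    unfold pvF
    rw [pv_rns_split re _ PySem.Set.empty PySem.Set.empty]

theorem pvKoSets_fst (kr : List (String × List String)) (re : List (String × List (String × List String)))
    (cache : PySem.Dict String (PySem.Set String × PySem.Set String)) (ko : String)
    (h : pvInv kr re cache) :
    pvInv kr re (pvKoSets kr re cache ko).1 := by
  unfold pvKoSets
  cases hc : cache.get? ko with
  | some v => exact h
  | none =>
    intro k v hk
    by_cases hkk : ko = k
    · subst hkk
      rw [PySem.Dict.get?_insert_self] at hk
      refine (Option.some_inj.mp hk).symm.trans ?_
      unfold pvF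
      rw [pv_rns_split re _ PySem.Set.empty PySem.Set.empty]
    · rw [PySem.Dict.get?_insert_of_ne _ _ (fun he => hkk he.symm)] at hk
      exact h k v hk

-- the pair-collecting fold: threads the cache (invariant preserved) and appends pvF values
theorem pv_pairs_fold (kr : List (String × List String)) (re : List (String × List (String × List String)))
    (kos : List String)
    (cache : PySem.Dict String (PySem.Set String × PySem.Set String))
    (acc : List (PySem.Set String × PySem.Set String)) (h : pvInv kr re cache) :
    pvInv kr re (kos.foldl (pvPairStep kr re) (cache, acc)).1 ∧
    (kos.foldl (pvPairStep kr re) (cache, acc)).2 = acc ++ kos.map (pvF kr re) := by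
  induction kos generalizing cache acc with
  | nil => exact ⟨h, by simp⟩
  | cons ko kos ih =>
    simp only [List.foldl_cons, List.map_cons]
    have hstep : pvPairStep kr re (cache, acc) ko
        = ((pvKoSets kr re cache ko).1, acc ++ [pvF kr re ko]) := by
      unfold pvPairStep
      rw [pvKoSets_snd kr re cache ko h]
    rw [hstep]
    obtain ⟨h1, h2⟩ := ih (pvKoSets kr re cache ko).1 (acc ++ [pvF kr re ko]) (pvKoSets_fst kr re cache ko h)
    exact ⟨h1, by rw [h2]; simp⟩

-- A's interleaved per-species fold equals B's map-then-two-unions shape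
theorem pv_species_map (kr : List (String × List String)) (re : List (String × List (String × List String)))
    (kos : List String) (a b : PySem.Set String) :
    kos.foldl (fun pc ko => ((PySem.Dict.mk kr).getD ko []).foldl (pvRnStep re) pc) (a, b) =
      ((kos.map (pvF kr re)).foldl (fun s q => PySem.Set.union s q.1) a,
       (kos.map (pvF kr re)).foldl (fun s q => PySem.Set.union s q.2) b) := by
  induction kos generalizing a b with
  | nil => simp
  | cons ko kos ih =>
    simp only [List.foldl_cons, List.map_cons]
    rw [pv_foldl_rnStep]
    exact ih _ _

-- the outer fold: B's caps component equals A's fold, for any invariant-satisfying cache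
theorem pv_outer (kr : List (String × List String)) (re : List (String × List (String × List String)))
    (sk : List (String × List String))
    (cache : PySem.Dict String (PySem.Set String × PySem.Set String))
    (caps : PySem.Dict String (List (String × List String))) (h : pvInv kr re cache) :
    (sk.foldl
      (fun (st : PySem.Dict String (PySem.Set String × PySem.Set String) × PySem.Dict String (List (String × List String))) p =>
        ((p.2.foldl (pvPairStep kr re) (st.1, [])).1,
         st.2.insert p.1
           [("produces", (p.2.foldl (pvPairStep kr re) (st.1, [])).2.foldl
               (fun s q => PySem.Set.union s q.1) (PySem.Set.empty : PySem.Set String)),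
            ("consumes", (p.2.foldl (pvPairStep kr re) (st.1, [])).2.foldl
               (fun s q => PySem.Set.union s q.2) (PySem.Set.empty : PySem.Set String))]))
      (cache, caps)).2 =
    sk.foldl
      (fun (caps : PySem.Dict String (List (String × List String))) p =>
        let pc := p.2.foldl
          (fun pc ko => ((PySem.Dict.mk kr).getD ko []).foldl (pvRnStep re) pc)
          ((PySem.Set.empty : PySem.Set String), (PySem.Set.empty : PySem.Set String))
        caps.insert p.1 [("produces", pc.1), ("consumes", pc.2)]) caps := by
  induction sk generalizing cache caps with
  | nil => rfl
  | cons p sk ih =>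
    simp only [List.foldl_cons]
    obtain ⟨h1, h2⟩ := pv_pairs_fold kr re p.2 cache [] h
    rw [ih _ _ h1]
    congr 2
    rw [h2, pv_species_map kr re p.2 PySem.Set.empty PySem.Set.empty]
    simp

-- ===== VERDICT (by name: the statement is the Claim_ definition above) =====
theorem build_species_capabilities_spec : Claim_equal_build_species_capabilities := by
  intro sk kr re _hdom _hpre
  show build_species_capabilities sk kr re = build_species_capabilities_alt sk kr re
  unfold build_species_capabilities build_species_capabilities_alt
  rw [pv_outer kr re sk PySem.Dict.empty PySem.Dict.empty (fun ko v h => by simp at h)]
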